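-- pv_equiv track=rewrite | github.com/Kiran-Bhairava/godavarikrishna-hrms | backend/routers/payroll.py | _parse_weekly_off
-- ===== SOURCE A (Python) =====
-- from typing import Optional
--
-- def _parse_weekly_off(weekly_off_str: Optional[str]) -> set[int]:
--     """
--     Parse employee's weekly_off string into weekday integers (Mon=0, Sun=6).
--     Handles: "Sunday", "Saturday & Sunday", "Saturday, Sunday", etc.
--     Defaults to {6} (Sunday only) if blank or unparseable.
--     """
--     WEEKDAY_MAP = {
--         "monday": 0, "tuesday": 1, "wednesday": 2, "thursday": 3,
--         "friday": 4, "saturday": 5, "sunday": 6,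
--     }
--     if not weekly_off_str:
--         return {6}
--     days = set()
--     for token in weekly_off_str.lower().replace("&", " ").replace(",", " ").split():
--         if token in WEEKDAY_MAP:
--             days.add(WEEKDAY_MAP[token])
--     return days if days else {6}
-- ===== SOURCE B (Python) =====
-- from typing import Optional
--
-- _WEEKDAY_NAMES = ("monday", "tuesday", "wednesday", "thursday",
--                   "friday", "saturday", "sunday")
--
--
-- def _parse_weekly_off(weekly_off_str: Optional[str]) -> set[int]:
--     """Single character-level scan: lower-case while tokenizing on
--     whitespace/'&'/',' and classify each finished token against the
--     seven weekday names (position = weekday number)."""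
--     if not weekly_off_str:
--         return {6}
--     days = set()
--     token = ""
--     for ch in weekly_off_str:
--         if ch.isspace() or ch == "&" or ch == ",":
--             if token in _WEEKDAY_NAMES:
--                 days.add(_WEEKDAY_NAMES.index(token))
--             token = ""
--         else:
--             token += ch.lower()
--     if token in _WEEKDAY_NAMES:
--         days.add(_WEEKDAY_NAMES.index(token))
--     return days if days else {6}
-- ===== Notes on version B (the rewrite author's own statement) =====
-- stated objective: alternative
-- what changed: Replaces A's lower/replace/replace/split string-rewriting pipeline plus dict lookups with a single character-level scanner that lower-cases and tokenizes in one pass and classifies each finished token by its position in the fixed weekday-name tuple.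
import Mathlib
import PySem

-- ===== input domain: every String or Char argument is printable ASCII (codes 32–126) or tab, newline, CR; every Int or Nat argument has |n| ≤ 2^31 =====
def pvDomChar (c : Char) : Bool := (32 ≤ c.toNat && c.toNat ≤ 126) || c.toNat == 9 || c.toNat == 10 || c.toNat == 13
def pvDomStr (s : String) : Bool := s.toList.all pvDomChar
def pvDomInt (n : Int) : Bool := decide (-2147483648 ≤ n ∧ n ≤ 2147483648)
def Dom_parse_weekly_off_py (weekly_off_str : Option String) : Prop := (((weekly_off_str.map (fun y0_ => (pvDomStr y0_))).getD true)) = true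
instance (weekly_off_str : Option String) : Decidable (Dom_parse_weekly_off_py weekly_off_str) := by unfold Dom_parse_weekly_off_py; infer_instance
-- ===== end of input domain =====

-- B replaces A's lower/replace/replace/split string-rewriting pipeline by a single
-- character-level scanner that tokenizes and lower-cases in one pass (alternative decomposition).

-- ===== PORT A =====
def pvWeekdayMap : PySem.Dict String Int :=
  PySem.Dict.ofList [("monday", 0), ("tuesday", 1), ("wednesday", 2), ("thursday", 3),
                     ("friday", 4), ("saturday", 5), ("sunday", 6)]

def parse_weekly_off_py (weekly_off_str : Option String) : List Int :=
  match weekly_off_str with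
  | none => [6]
  | some s =>
    if s = "" then [6]
    else
      let tokens := PySem.Str.split₀
        (PySem.Str.replace (PySem.Str.replace (PySem.Str.lower s) "&" " ") "," " ")
      let days := tokens.foldl (fun days token =>
        if pvWeekdayMap.contains token then PySem.Set.add days (pvWeekdayMap.getD token 0)
        else days) ([] : PySem.Set Int)
      if days.isEmpty then [6] else days

-- ===== PORT B =====
def pvWeekdayNames : List String :=
  ["monday", "tuesday", "wednesday", "thursday", "friday", "saturday", "sunday"]

-- `if token in NAMES: days.add(NAMES.index(token))` (the token is built as a list of chars)
def pvFlush (days : PySem.Set Int) (token : List Char) : PySem.Set Int :=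
  match PySem.List.index? pvWeekdayNames (String.ofList token) with
  | some i => PySem.Set.add days (i : Int)
  | none => days

-- B's `for ch in weekly_off_str` loop, including the final flush after the loop
def pvScan : List Char → PySem.Set Int → List Char → PySem.Set Int
  | [], days, token => pvFlush days token
  | c :: rest, days, token =>
    if PySem.Chars.isspace c || c == '&' || c == ',' then pvScan rest (pvFlush days token) []
    else pvScan rest days (token ++ [PySem.Chars.lowerChar c])

def parse_weekly_off_py_alt (weekly_off_str : Option String) : List Int :=
  match weekly_off_str with
  | none => [6]
  | some s =>
    if s = "" then [6]
    else
      let days := pvScan s.toList [] []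
      if days.isEmpty then [6] else days

-- ===== PRECONDITION & SPEC =====
def Spec_parse_weekly_off_py (weekly_off_str : Option String) (out : List Int) : Prop := out = parse_weekly_off_py_alt weekly_off_str
instance (weekly_off_str : Option String) (out : List Int) : Decidable (Spec_parse_weekly_off_py weekly_off_str out) := by unfold Spec_parse_weekly_off_py; infer_instance

-- ===== CLAIM (what is proved, stated in full; the proofs are below) =====
def Claim_equal_parse_weekly_off_py : Prop := ∀ (weekly_off_str : Option String), Dom_parse_weekly_off_py weekly_off_str → Spec_parse_weekly_off_py weekly_off_str (parse_weekly_off_py weekly_off_str)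

-- ===== LEMMAS AND PROOFS =====

-- A's per-token fold step, pulled through `String.ofList` (proof-only helper)
def pvAStep (d : PySem.Set Int) (w : List Char) : PySem.Set Int :=
  if pvWeekdayMap.contains (String.ofList w) then
    PySem.Set.add d (pvWeekdayMap.getD (String.ofList w) 0)
  else d

-- the char map performed by A's `.lower().replace("&"," ").replace(","," ")` chain
def pvG (c : Char) : Char :=
  if (if PySem.Chars.lowerChar c == '&' then ' ' else PySem.Chars.lowerChar c) == ',' then ' '
  else if PySem.Chars.lowerChar c == '&' then ' ' else PySem.Chars.lowerChar c

theorem pv_replace_go_single (a b : Char) :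
    ∀ (fuel : Nat) (l acc : List Char), l.length ≤ fuel →
      PySem.Chars.replace.go [a] [b] fuel l acc
        = acc.reverse ++ l.map (fun c => if c == a then b else c) := by
  intro fuel
  induction fuel with
  | zero =>
    intro l acc h
    have : l = [] := List.eq_nil_of_length_eq_zero (Nat.le_zero.mp h)
    subst this
    simp [PySem.Chars.replace.go]
  | succ n ih =>
    intro l acc h
    cases l with
    | nil => simp [PySem.Chars.replace.go]
    | cons c t =>
      simp only [PySem.Chars.replace.go]
      by_cases hc : a = c
      · subst hc
        have hpre : List.isPrefixOf [a] (a :: t) = true := by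
          simp [List.isPrefixOf]
        simp only [hpre, if_pos]
        rw [ih]
        · simp
        · simpa using Nat.le_of_succ_le_succ h
      · have hpre : List.isPrefixOf [a] (c :: t) = false := by
          simp [List.isPrefixOf, hc]
        simp only [hpre]
        rw [ih t (c :: acc) (by simpa using Nat.le_of_succ_le_succ h)]
        simp [Ne.symm hc]

theorem pv_replace_single (l : List Char) (a b : Char) :
    PySem.Chars.replace l [a] [b] = l.map (fun c => if c == a then b else c) := by
  simp [PySem.Chars.replace, pv_replace_go_single a b l.length l [] le_rfl]

theorem pv_chain_eq (s : String) :
    (PySem.Str.replace (PySem.Str.replace (PySem.Str.lower s) "&" " ") "," " ").toList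
      = s.toList.map pvG := by
  simp only [PySem.Str.replace, String.toList_ofList, PySem.Str.toList_lower]
  rw [show ("&" : String).toList = ['&'] from by decide,
      show ("," : String).toList = [','] from by decide,
      show (" " : String).toList = [' '] from by decide]
  rw [pv_replace_single, pv_replace_single]
  simp only [PySem.Chars.lower, List.map_map]
  rfl

theorem pv_toNat_ofNat (n : Nat) (h : n.isValidChar) : (Char.ofNat n).toNat = n := by
  simp only [Char.ofNat, dif_pos h]; rfl

theorem pv_isupper_bounds (c : Char) (h : PySem.Chars.isupper c = true) :
    65 ≤ c.toNat ∧ c.toNat ≤ 90 := by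
  simp only [PySem.Chars.isupper, Bool.and_eq_true, decide_eq_true_eq] at h
  exact ⟨h.1, h.2⟩

theorem pv_lowerChar_toNat (c : Char) (h : PySem.Chars.isupper c = true) :
    (PySem.Chars.lowerChar c).toNat = c.toNat + 32 := by
  have hb := pv_isupper_bounds c h
  simp only [PySem.Chars.lowerChar, h, if_pos]
  exact pv_toNat_ofNat _ (Or.inl (by omega))

theorem pv_lowerChar_ne (c : Char) (hu : PySem.Chars.isupper c = true) (d : Char)
    (hd : d.toNat < 97) : PySem.Chars.lowerChar c ≠ d := by
  intro he
  have h1 := pv_lowerChar_toNat c hu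
  have hb := pv_isupper_bounds c hu
  rw [he] at h1
  omega

theorem pv_isspace_lowerChar (c : Char) :
    PySem.Chars.isspace (PySem.Chars.lowerChar c) = PySem.Chars.isspace c := by
  by_cases h : PySem.Chars.isupper c = true
  · have h1 := pv_lowerChar_toNat c h
    have hb := pv_isupper_bounds c h
    simp only [PySem.Chars.isspace, h1]
    rw [Bool.eq_iff_iff]
    simp only [Bool.or_eq_true, Bool.and_eq_true, decide_eq_true_eq]
    omega
  · simp [PySem.Chars.lowerChar, h]

theorem pv_nonsep_g (c : Char)
    (h : (PySem.Chars.isspace c || c == '&' || c == ',') = false) :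
    pvG c = PySem.Chars.lowerChar c := by
  simp only [Bool.or_eq_false_iff, beq_eq_false_iff_ne, ne_eq] at h
  have key : PySem.Chars.lowerChar c ≠ '&' ∧ PySem.Chars.lowerChar c ≠ ',' := by
    by_cases hu : PySem.Chars.isupper c = true
    · exact ⟨pv_lowerChar_ne c hu _ (by decide), pv_lowerChar_ne c hu _ (by decide)⟩
    · simp only [PySem.Chars.lowerChar, hu, if_neg, Bool.not_eq_true]
      simp [h.1.2, h.2]
  simp [pvG, key.1, key.2]

theorem pv_sep_g (c : Char) :
    PySem.Chars.isspace (pvG c) = (PySem.Chars.isspace c || c == '&' || c == ',') := by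
  by_cases h1 : c = '&'
  · subst h1; decide
  by_cases h2 : c = ','
  · subst h2; decide
  by_cases hs : PySem.Chars.isspace c = true
  · have hu : PySem.Chars.isupper c = false := by
      by_contra hcon
      have hu' : PySem.Chars.isupper c = true := by
        cases hcu : PySem.Chars.isupper c
        · exact absurd hcu hcon
        · rfl
      have hb := pv_isupper_bounds c hu'
      have hs' : PySem.Chars.isspace c = false := by
        simp only [PySem.Chars.isspace, Bool.or_eq_false_iff, Bool.and_eq_false_iff,
          decide_eq_false_iff_not]
        omega
      rw [hs'] at hs
      exact absurd hs (by simp)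
    have hg : pvG c = c := by
      have hl : PySem.Chars.lowerChar c = c := by simp [PySem.Chars.lowerChar, hu]
      simp [pvG, hl, h1, h2]
    simp [hg, hs]
  · have h' : (PySem.Chars.isspace c || c == '&' || c == ',') = false := by
      simp [hs, h1, h2]
    rw [pv_nonsep_g c h', pv_isspace_lowerChar, h']
    simpa using hs

theorem pv_beq_false (w : List Char) (nm : String) (hne : w ≠ nm.toList) :
    (nm == String.ofList w) = false := by
  simp only [beq_eq_false_iff_ne, ne_eq]
  intro he
  exact hne (by rw [he, String.toList_ofList])

-- A's per-token dict step equals B's name-index flush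
theorem pv_step_eq (d : PySem.Set Int) (w : List Char) : pvAStep d w = pvFlush d w := by
  by_cases h1 : w = "monday".toList
  · subst h1; rfl
  by_cases h2 : w = "tuesday".toList
  · subst h2; rfl
  by_cases h3 : w = "wednesday".toList
  · subst h3; rfl
  by_cases h4 : w = "thursday".toList
  · subst h4; rfl
  by_cases h5 : w = "friday".toList
  · subst h5; rfl
  by_cases h6 : w = "saturday".toList
  · subst h6; rfl
  by_cases h7 : w = "sunday".toList
  · subst h7; rfl
  have e1 := pv_beq_false w _ h1
  have e2 := pv_beq_false w _ h2
  have e3 := pv_beq_false w _ h3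
  have e4 := pv_beq_false w _ h4
  have e5 := pv_beq_false w _ h5
  have e6 := pv_beq_false w _ h6
  have e7 := pv_beq_false w _ h7
  have hc : pvWeekdayMap.contains (String.ofList w) = false := by
    have hitems : pvWeekdayMap.items = [("monday", 0), ("tuesday", 1), ("wednesday", 2),
        ("thursday", 3), ("friday", 4), ("saturday", 5), ("sunday", 6)] := by decide
    simp [PySem.Dict.contains, hitems, e1, e2, e3, e4, e5, e6, e7]
  have hi : List.idxOf? (String.ofList w) pvWeekdayNames = none := by
    simp [pvWeekdayNames, List.idxOf?, List.findIdx?, List.findIdx?.go, e1, e2, e3, e4, e5, e6, e7]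
  simp [pvAStep, hc, pvFlush, PySem.List.index?, hi]

theorem pv_scan_eq : ∀ (L cur : List Char) (acc : List (List Char)) (days : PySem.Set Int),
    List.foldl pvAStep days (PySem.Chars.split₀.go (L.map pvG) cur acc)
      = pvScan L (List.foldl pvAStep days acc.reverse) cur.reverse := by
  intro L
  induction L with
  | nil =>
    intro cur acc days
    cases cur with
    | nil => simp [PySem.Chars.split₀.go, pvScan, pvFlush]; rfl
    | cons c cs =>
      simp only [List.map_nil, PySem.Chars.split₀.go, List.isEmpty_cons, Bool.false_eq_true,
        if_false, List.reverse_cons, pvScan]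
      rw [List.foldl_append]
      simp [pv_step_eq]
  | cons c rest ih =>
    intro cur acc days
    simp only [List.map_cons, PySem.Chars.split₀.go, pv_sep_g]
    by_cases hsep : (PySem.Chars.isspace c || c == '&' || c == ',') = true
    · rw [hsep]
      simp only [if_pos, pvScan, hsep]
      cases cur with
      | nil =>
        simp only [List.isEmpty_nil, if_pos, List.reverse_nil]
        rw [ih [] acc days]
        simp [pvFlush]
        rfl
      | cons c' cs' =>
        simp only [List.isEmpty_cons, Bool.false_eq_true, if_false]
        rw [ih [] ((c' :: cs').reverse :: acc) days]
        simp only [List.reverse_cons, List.foldl_append, List.foldl_cons, List.foldl_nil,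
          List.reverse_nil]
        rw [pv_step_eq]
    · have hsep' : (PySem.Chars.isspace c || c == '&' || c == ',') = false := by
        simpa using hsep
      rw [hsep']
      simp only [Bool.false_eq_true, if_false, pvScan, hsep']
      rw [ih (pvG c :: cur) acc days]
      rw [pv_nonsep_g c hsep']
      simp

-- ===== VERDICT (by name: the statement is the Claim_ definition above) =====
theorem parse_weekly_off_py_spec : Claim_equal_parse_weekly_off_py := by
  intro w _
  unfold Spec_parse_weekly_off_py
  cases w with
  | none => rfl
  | some s =>
    by_cases hs : s = ""
    · simp [parse_weekly_off_py, parse_weekly_off_py_alt, hs]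
    · simp only [parse_weekly_off_py, parse_weekly_off_py_alt, hs, if_false]
      have htok : PySem.Str.split₀
          (PySem.Str.replace (PySem.Str.replace (PySem.Str.lower s) "&" " ") "," " ")
          = (PySem.Chars.split₀ (s.toList.map pvG)).map String.ofList := by
        rw [PySem.Str.split₀, pv_chain_eq]
      rw [htok, List.foldl_map]
      have hdays := pv_scan_eq s.toList [] [] []
      simp only [List.reverse_nil, List.foldl_nil] at hdays
      rw [show PySem.Chars.split₀.go (s.toList.map pvG) [] []
            = PySem.Chars.split₀ (s.toList.map pvG) from rfl] at hdays
      rw [show (fun (x : PySem.Set Int) (y : List Char) =>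
          if pvWeekdayMap.contains (String.ofList y) = true then
            PySem.Set.add x (pvWeekdayMap.getD (String.ofList y) 0)
          else x) = pvAStep from rfl]
      rw [hdays]
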